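-- pv_equiv track=rewrite | github.com/boltzj/coding-challenge | question1/q1v3.py | is_over
-- ===== SOURCE A (Python) =====
-- def is_over(deck):
--     """
--     :return: Return true if the game deck is at initial status, False otherwise
--     """
--     # First card value (We assumed that first card value is 0)
--     expected_value = 0
--
--     # Iterate on card value
--     for card in deck:
--         if card == expected_value:
--             # Increment expected value and continue
--             expected_value += 1
--         else:
--             # Deck is not as the initial status
--             return False
--     # Deck is at the initial status
--     return True
-- ===== SOURCE B (Python) =====
-- def is_over(deck):
--     """
--     :return: Return true if the game deck is at initial status, False otherwise
--     """
--     if not deck: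
--         return True
--     return (deck[0] == 0
--             and deck[-1] == len(deck) - 1
--             and all(a < b for a, b in zip(deck, deck[1:])))
-- ===== Notes on version B (the rewrite author's own statement) =====
-- stated objective: alternative
-- what changed: Instead of comparing each card to an incrementing expected counter, B checks a different characterization: first card 0, last card len-1, and strictly increasing adjacent pairs; correctness rests on the gap argument that n-1 strict integer increases spanning exactly n-1 force consecutive values.
import Mathlib
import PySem

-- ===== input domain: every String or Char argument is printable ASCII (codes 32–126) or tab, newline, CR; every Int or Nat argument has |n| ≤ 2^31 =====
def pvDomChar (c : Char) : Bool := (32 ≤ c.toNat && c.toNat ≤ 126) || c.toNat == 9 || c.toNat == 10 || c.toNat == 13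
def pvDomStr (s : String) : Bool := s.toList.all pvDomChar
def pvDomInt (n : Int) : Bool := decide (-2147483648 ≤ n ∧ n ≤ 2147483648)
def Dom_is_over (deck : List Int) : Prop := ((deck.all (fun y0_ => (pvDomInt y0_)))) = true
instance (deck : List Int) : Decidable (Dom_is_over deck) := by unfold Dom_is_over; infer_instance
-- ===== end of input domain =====

-- B replaces A's incrementing-counter scan with a different characterization (endpoints + strict
-- adjacent increase); objective: alternative, same cost.

-- ===== PORT A =====
-- the loop over deck carrying expected_value, with early return False
def is_over_loop (deck : List Int) (expected_value : Int) : Bool :=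
  match deck with
  | [] => true
  | card :: rest =>
      if card = expected_value then is_over_loop rest (expected_value + 1)
      else false

def is_over (deck : List Int) : Bool := is_over_loop deck 0

-- ===== PORT B =====
-- all(a < b for a, b in zip(deck, deck[1:]))
def chain_lt : List Int → Bool
  | [] => true
  | [_] => true
  | a :: b :: rest => decide (a < b) && chain_lt (b :: rest)

def is_over_alt (deck : List Int) : Bool :=
  match deck with
  | [] => true
  | _first :: _ =>
      decide (deck.headI = 0) &&
      decide (deck.getLast! = (deck.length : Int) - 1) &&
      chain_lt deck

-- ===== PRECONDITION & SPEC =====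
def Spec_is_over (deck : List Int) (out : Bool) : Prop := out = is_over_alt deck
instance (deck : List Int) (out : Bool) : Decidable (Spec_is_over deck out) := by unfold Spec_is_over; infer_instance

-- ===== CLAIM (what is proved, stated in full; the proofs are below) =====
def Claim_equal_is_over : Prop := ∀ (deck : List Int), Dom_is_over deck → Spec_is_over deck (is_over deck)

-- ===== LEMMAS AND PROOFS =====

-- a strict adjacent chain gains at least 1 per step: last ≥ head + (length - 1)
theorem chain_last_ge : ∀ (rest : List Int) (a : Int),
    chain_lt (a :: rest) = true → a + (rest.length : Int) ≤ (a :: rest).getLast! := by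
  intro rest
  induction rest with
  | nil => intro a _; simp [List.getLast!]
  | cons b r ih =>
      intro a h
      simp only [chain_lt, Bool.and_eq_true, decide_eq_true_eq] at h
      have := ih b h.2
      have hlast : (a :: b :: r).getLast! = (b :: r).getLast! := by
        simp [List.getLast!, List.getLast]
      rw [hlast]
      simp only [List.length_cons]
      push_cast
      omega

-- the common characterization: A's loop started at e accepts iff the deck is empty or
-- starts at e, ends at e + len - 1, and strictly increases at each adjacent pair
theorem is_over_loop_iff : ∀ (deck : List Int) (e : Int),
    is_over_loop deck e = true ↔
      (deck = [] ∨ (deck.headI = e ∧ deck.getLast! = e + (deck.length : Int) - 1 ∧ chain_lt deck = true)) := by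
  intro deck
  induction deck with
  | nil => intro e; simp [is_over_loop]
  | cons card rest ih =>
      intro e
      simp only [is_over_loop]
      constructor
      · intro h
        split_ifs at h with hc
        subst hc
        rcases (ih (card + 1)).mp h with hnil | ⟨hh, hl, hch⟩
        · subst hnil
          refine Or.inr ⟨rfl, ?_, ?_⟩
          · simp [List.getLast!]
          · simp [chain_lt]
        · cases rest with
          | nil =>
              refine Or.inr ⟨rfl, ?_, ?_⟩
              · have : ([card] : List Int).getLast! = card := by
                  simp [List.getLast!]
                rw [this]; simp
              · simp [chain_lt]
          | cons b r =>
              simp only [List.headI] at hh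
              refine Or.inr ⟨rfl, ?_, ?_⟩
              · have : (card :: b :: r).getLast! = (b :: r).getLast! := by
                  simp [List.getLast!, List.getLast]
                rw [this, hl]
                simp only [List.length_cons]
                push_cast; ring
              · simp only [chain_lt, Bool.and_eq_true, decide_eq_true_eq]
                exact ⟨by omega, hch⟩
      · rintro (hnil | ⟨hh, hl, hch⟩)
        · exact absurd hnil (by simp)
        · simp only [List.headI] at hh
          subst hh
          rw [if_pos rfl]
          apply (ih (card + 1)).mpr
          cases rest with
          | nil => exact Or.inl rfl
          | cons b r =>
              simp only [chain_lt, Bool.and_eq_true, decide_eq_true_eq] at hch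
              have hlast : (card :: b :: r).getLast! = (b :: r).getLast! := by
                simp [List.getLast!, List.getLast]
              rw [hlast] at hl
              have hge := chain_last_ge r b hch.2
              rw [hl] at hge
              have hb : b = card + 1 := by
                simp only [List.length_cons] at hge ⊢
                push_cast at hge ⊢
                omega
              refine Or.inr ⟨by simp [hb], ?_, hch.2⟩
              rw [hl]
              simp only [List.length_cons]
              push_cast; ring

theorem alt_iff (deck : List Int) :
    is_over_alt deck = true ↔
      (deck = [] ∨ (deck.headI = 0 ∧ deck.getLast! = 0 + (deck.length : Int) - 1 ∧ chain_lt deck = true)) := by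
  cases deck with
  | nil => simp [is_over_alt]
  | cons a r =>
      simp only [is_over_alt, Bool.and_eq_true, decide_eq_true_eq]
      constructor
      · rintro ⟨⟨h1, h2⟩, h3⟩
        exact Or.inr ⟨h1, by rw [h2]; ring, h3⟩
      · rintro (h | ⟨h1, h2, h3⟩)
        · exact absurd h (by simp)
        · exact ⟨⟨h1, by rw [h2]; ring⟩, h3⟩

-- ===== VERDICT (by name: the statement is the Claim_ definition above) =====
theorem is_over_spec : Claim_equal_is_over := by
  intro deck _
  unfold Spec_is_over is_over
  rw [Bool.eq_iff_iff, is_over_loop_iff, alt_iff]
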